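-- pv_equiv track=rewrite | github.com/LukhasAI/Lukhas | scripts/fix_t12_context_owners.py | patch_owner_in_fm
-- ===== SOURCE A (Python) =====
-- def find_front_matter_bounds(text: str) -> tuple[int, int]:
--     """Locate the start and end line indices of YAML front matter.
--
--     Searches for opening and closing '---' delimiters within the first 200 lines
--     of text. Returns the line indices (0-based) that bound the front matter block,
--     excluding the delimiters themselves.
--
--     Args:
--         text: Full text content to search for front matter boundaries.
--
--     Returns:
--         tuple[int, int]: A tuple (start_line, end_line) where start_line is 0
--             (the opening '---' line) and end_line is the index of the closing
--             '---' line. The actual YAML content is between start_line+1 and end_line.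
--
--     Raises:
--         ValueError: If no opening '---' found at line 0 (message: 'no fm start'),
--             or if no closing '---' found within first 200 lines (message: 'no fm end').
--
--     Example:
--         >>> find_front_matter_bounds("---\\nkey: value\\n---\\nBody")
--         (0, 2)
--         >>> find_front_matter_bounds("No front matter")
--         Traceback (most recent call last):
--         ValueError: no fm start
--     """
--     lines = text.splitlines()
--     if not lines or not lines[0].strip() == '---':
--         raise ValueError('no fm start')
--     for i in range(1, min(len(lines), 200)):
--         if lines[i].strip() == '---':
--             return (0, i)
--     raise ValueError('no fm end')
--
-- def patch_owner_in_fm(text: str, owner: str) -> str: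
--     """Update or insert owner field in YAML front matter.
--
--     Modifies the front matter block to set the owner field to the specified value.
--     If an existing 'owner:' line is found, it is replaced. If not found, the
--     owner field is appended to the front matter. Preserves all other front matter
--     fields and body content.
--
--     Args:
--         text: Full text content with YAML front matter to modify.
--         owner: Owner identifier to set (e.g., 'triage@lukhas').
--
--     Returns:
--         str: Modified text with updated owner field in front matter. Preserves
--             trailing newline if present in original text.
--
--     Raises:
--         ValueError: If front matter bounds cannot be determined (via
--             find_front_matter_bounds).
--
--     Example:
--         >>> patch_owner_in_fm("---\\nmodule: test\\nowner: old\\n---\\nBody", "triage@lukhas")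
--         '---\\nmodule: test\\nowner: triage@lukhas\\n---\\nBody'
--         >>> patch_owner_in_fm("---\\nmodule: test\\n---\\nBody", "triage@lukhas")
--         '---\\nmodule: test\\nowner: triage@lukhas\\n---\\nBody'
--     """
--     lines = text.splitlines()
--     start, end = find_front_matter_bounds(text)
--     fm = lines[start + 1 : end]
--     out_fm = []
--     saw_owner = False
--     for line in fm:
--         if line.strip().startswith('owner:'):
--             out_fm.append(f'owner: {owner}')
--             saw_owner = True
--         else:
--             out_fm.append(line)
--     if not saw_owner:
--         out_fm.append(f'owner: {owner}')
--     new_lines = []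
--     new_lines.extend(lines[: start + 1])
--     new_lines.extend(out_fm)
--     new_lines.append('---')
--     new_lines.extend(lines[end + 1 :])
--     return '\n'.join(new_lines) + ('\n' if text.endswith('\n') else '')
-- ===== SOURCE B (Python) =====
-- def patch_owner_in_fm(text: str, owner: str) -> str:
--     # Single fused recursive pass: never computes the front-matter bounds or slices;
--     # the same traversal that looks for the closing '---' patches/inserts the owner line.
--     lines = text.splitlines()
--     if not lines or lines[0].strip() != '---':
--         raise ValueError('no fm start')
--     new = f'owner: {owner}'
--     limit = min(len(lines), 200)
--
--     def go(i, seen):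
--         if i >= limit:
--             raise ValueError('no fm end')
--         line = lines[i]
--         if line.strip() == '---':
--             return ([] if seen else [new]) + ['---'] + lines[i + 1:]
--         if line.strip().startswith('owner:'):
--             return [new] + go(i + 1, True)
--         return [line] + go(i + 1, seen)
--
--     return '\n'.join([lines[0]] + go(1, False)) + ('\n' if text.endswith('\n') else '')
-- ===== Notes on version B (the rewrite author's own statement) =====
-- stated objective: alternative
-- what changed: A runs staged passes -- find_front_matter_bounds scans for the closing '---', then a flag-carrying loop rewrites the sliced front-matter list and the document is rebuilt from slices; B is one fused recursive descent over the lines that patches/inserts the owner line while it is still looking for the closing '---', so it never computes the bounds, never slices the front matter out, and keeps no index bookkeeping.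
import Mathlib
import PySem

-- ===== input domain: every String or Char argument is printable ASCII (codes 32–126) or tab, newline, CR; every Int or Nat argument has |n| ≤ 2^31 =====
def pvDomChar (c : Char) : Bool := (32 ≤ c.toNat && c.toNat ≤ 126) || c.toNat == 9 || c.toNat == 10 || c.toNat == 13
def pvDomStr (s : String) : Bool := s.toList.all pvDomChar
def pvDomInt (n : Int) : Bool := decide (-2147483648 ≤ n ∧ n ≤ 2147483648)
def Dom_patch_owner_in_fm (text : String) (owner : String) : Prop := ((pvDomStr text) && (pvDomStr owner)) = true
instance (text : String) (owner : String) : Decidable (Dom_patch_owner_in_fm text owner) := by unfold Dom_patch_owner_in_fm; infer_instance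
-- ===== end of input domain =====

-- B replaces A's staged passes (find the front-matter bounds, slice the block out, rewrite it with a
-- flag loop, rebuild from slices) by ONE fused recursive descent over the lines that patches/inserts
-- the owner line while still searching for the closing '---'; objective: alternative, same cost.

-- ===== PORT A =====
-- line.strip().startswith('owner:')  (the same expression occurs in both Pythons)
def pvIsOwnerLine (line : String) : Bool :=
  PySem.Str.startswith (PySem.Str.strip line) "owner:"

-- find_front_matter_bounds: `none` = ValueError ('no fm start' / 'no fm end')
def find_front_matter_bounds? (text : String) : Option (Int × Int) :=
  let lines := PySem.Str.splitlines text
  if lines = [] ∨ ¬ (PySem.Str.strip (lines.headD "") = "---") then none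
  else
    match (PySem.List.pyRange 1 (min (lines.length : Int) 200) 1).find?
        (fun i => PySem.Str.strip (PySem.List.pyGetD lines i "") == "---") with
    | some i => some (0, i)
    | none => none

def patch_owner_in_fm (text : String) (owner : String) : String :=
  let lines := PySem.Str.splitlines text
  match find_front_matter_bounds? text with
  | none => ""  -- Python raises ValueError here; excluded by Pre_
  | some (start, e) =>
    let fm := PySem.List.slice lines (some (start + 1)) (some e)
    let st := fm.foldl (fun (acc : List String × Bool) line =>
        if pvIsOwnerLine line then (acc.1 ++ ["owner: " ++ owner], true)
        else (acc.1 ++ [line], acc.2)) ([], false)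
    let out_fm := if st.2 = false then st.1 ++ ["owner: " ++ owner] else st.1
    let new_lines := PySem.List.slice lines none (some (start + 1)) ++ out_fm
        ++ ["---"] ++ PySem.List.slice lines (some (e + 1)) none
    PySem.Str.join "\n" new_lines ++ (if PySem.Str.endswith text "\n" then "\n" else "")

-- ===== PORT B =====
-- B's inner recursion go(i, seen); the `else []` branch is Python's raise ValueError('no fm end'),
-- excluded by Pre_.  lines[i] is in range whenever i < limit ≤ len(lines), so List.getD is exact;
-- lines[i+1:] with i+1 ≥ 0 is List.drop.
def pvGo (lines : List String) (new : String) (limit : Nat) (i : Nat) (seen : Bool) : List String :=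
  if _h : i < limit then
    let line := lines.getD i ""
    if PySem.Str.strip line = "---" then
      (if seen then [] else [new]) ++ ["---"] ++ lines.drop (i + 1)
    else if pvIsOwnerLine line then
      new :: pvGo lines new limit (i + 1) true
    else
      line :: pvGo lines new limit (i + 1) seen
  else []
termination_by limit - i

def patch_owner_in_fm_alt (text : String) (owner : String) : String :=
  let lines := PySem.Str.splitlines text
  if lines = [] ∨ ¬ (PySem.Str.strip (lines.headD "") = "---") then ""  -- raise ValueError('no fm start'); excluded by Pre_
  else
    let new := "owner: " ++ owner
    let limit := min lines.length 200
    PySem.Str.join "\n" ((lines.headD "") :: pvGo lines new limit 1 false)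
      ++ (if PySem.Str.endswith text "\n" then "\n" else "")

-- ===== PRECONDITION & SPEC =====
-- Pre_ excludes exactly the inputs on which A raises ValueError (no stripped '---' on line 0, or no
-- closing stripped '---' within the first 200 lines); B raises the same ValueError there.
def Pre_patch_owner_in_fm (text : String) (owner : String) : Prop :=
  let lines := PySem.Str.splitlines text
  lines ≠ [] ∧ PySem.Str.strip (lines.headD "") = "---" ∧
    ((List.range (min lines.length 200)).any
      (fun i => decide (1 ≤ i) && (PySem.Str.strip (lines.getD i "") == "---"))) = true
instance (text : String) (owner : String) : Decidable (Pre_patch_owner_in_fm text owner) := by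
  unfold Pre_patch_owner_in_fm; infer_instance

def pvWitness_patch_owner_in_fm : String × String := ("---\nmodule: test\nowner: old\n---\nBody\n", "triage@lukhas")

def Spec_patch_owner_in_fm (text : String) (owner : String) (out : String) : Prop := out = patch_owner_in_fm_alt text owner
instance (text : String) (owner : String) (out : String) : Decidable (Spec_patch_owner_in_fm text owner out) := by unfold Spec_patch_owner_in_fm; infer_instance

-- ===== CLAIM (what is proved, stated in full; the proofs are below) =====
def Claim_equal_patch_owner_in_fm : Prop := ∀ (text : String) (owner : String), Dom_patch_owner_in_fm text owner → Pre_patch_owner_in_fm text owner → Spec_patch_owner_in_fm text owner (patch_owner_in_fm text owner)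

-- ===== LEMMAS AND PROOFS =====

-- A's flag-carrying rebuild loop, in closed form
theorem pv_foldA (new : String) (fm : List String) (acc : List String) (b : Bool) :
    fm.foldl (fun (ac : List String × Bool) line =>
        if pvIsOwnerLine line then (ac.1 ++ [new], true) else (ac.1 ++ [line], ac.2)) (acc, b)
      = (acc ++ fm.map (fun l => if pvIsOwnerLine l then new else l), b || fm.any pvIsOwnerLine) := by
  induction fm generalizing acc b with
  | nil => simp
  | cons x t ih => by_cases h : pvIsOwnerLine x <;> simp [h, ih]

-- find? over a unit-step range finds the MINIMAL index satisfying p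
theorem pv_find_min (p : Int → Bool) (b e : Int) :
    ∀ (k : Nat) (a : Int), (b - a).toNat = k →
      (PySem.List.pyRange a b 1).find? p = some e →
      ∀ j, a ≤ j → j < e → p j = false := by
  intro k
  induction k with
  | zero =>
    intro a hk hfind
    rw [PySem.List.pyRange_one_eq_nil (by omega)] at hfind
    simp at hfind
  | succ k ih =>
    intro a hk hfind j haj hje
    rw [PySem.List.pyRange_one_cons (by omega)] at hfind
    by_cases hpa : p a = true
    · rw [List.find?_cons_of_pos hpa] at hfind
      have : a = e := by simpa using hfind
      omega
    · rw [Bool.not_eq_true] at hpa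
      rw [List.find?_cons_of_neg (by simp [hpa])] at hfind
      rcases eq_or_lt_of_le haj with rfl | hlt
      · exact hpa
      · exact ih (a + 1) (by omega) hfind j (by omega) hje

theorem pv_fmb_some (text : String)
    (hne : PySem.Str.splitlines text ≠ [])
    (hhead : PySem.Str.strip ((PySem.Str.splitlines text).headD "") = "---")
    (hany : ((List.range (min (PySem.Str.splitlines text).length 200)).any
      (fun i => decide (1 ≤ i) && (PySem.Str.strip ((PySem.Str.splitlines text).getD i "") == "---"))) = true) :
    ∃ n : Nat, find_front_matter_bounds? text = some (0, (n : Int)) ∧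
      1 ≤ n ∧ n < min (PySem.Str.splitlines text).length 200 ∧
      PySem.Str.strip ((PySem.Str.splitlines text).getD n "") = "---" ∧
      ∀ j : Nat, 1 ≤ j → j < n → ¬ PySem.Str.strip ((PySem.Str.splitlines text).getD j "") = "---" := by
  set lines := PySem.Str.splitlines text with hl
  have hhead' : PySem.Str.strip (lines.head?.getD "") = "---" := by
    simpa [List.headD_eq_head?_getD] using hhead
  unfold find_front_matter_bounds?
  rw [← hl]
  rcases hfind : (PySem.List.pyRange 1 (min (lines.length : Int) 200) 1).find?
      (fun i => PySem.Str.strip (PySem.List.pyGetD lines i "") == "---") with _ | e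
  · exfalso
    rw [List.find?_eq_none] at hfind
    obtain ⟨i, hi, hp⟩ := List.any_eq_true.mp hany
    rw [List.mem_range] at hi
    rw [Bool.and_eq_true, decide_eq_true_eq] at hp
    obtain ⟨h1, h2⟩ := hp
    refine hfind (i : Int) ?_ ?_
    · rw [PySem.List.mem_pyRange_one]
      constructor
      · exact_mod_cast h1
      · have : (i : Int) < ((min lines.length 200 : Nat) : Int) := by exact_mod_cast hi
        simpa [Nat.cast_min] using this
    · rw [PySem.List.pyGetD_natCast]; exact h2
  · have hmem := List.mem_of_find?_eq_some hfind
    rw [PySem.List.mem_pyRange_one] at hmem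
    have hcast : ((min lines.length 200 : Nat) : Int) = min (lines.length : Int) 200 := by
      simp [Nat.cast_min]
    have hnn : (0 : Int) ≤ e := by omega
    have he : ((e.toNat : Nat) : Int) = e := Int.toNat_of_nonneg hnn
    have hpe := List.find?_some hfind
    rw [← he, PySem.List.pyGetD_natCast] at hpe
    have hmin := pv_find_min _ _ e (min (lines.length : Int) 200 - 1).toNat 1 rfl hfind
    refine ⟨e.toNat, ?_, by omega, by omega, by simpa using hpe, ?_⟩
    · simp [hfind, hne, hhead', he]
    · intro j hj1 hje hstr
      have := hmin (j : Int) (by exact_mod_cast hj1) (by omega)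
      rw [PySem.List.pyGetD_natCast, beq_eq_false_iff_ne] at this
      exact this hstr

-- B's fused recursion, characterised against the first closing index n
theorem pv_go_eq (lines : List String) (new : String) (n : Nat)
    (hn : n < min lines.length 200)
    (hclose : PySem.Str.strip (lines.getD n "") = "---")
    (hmin : ∀ j : Nat, 1 ≤ j → j < n → ¬ PySem.Str.strip (lines.getD j "") = "---") :
    ∀ (k i : Nat) (seen : Bool), 1 ≤ i → i ≤ n → n - i = k →
      pvGo lines new (min lines.length 200) i seen =
        ((lines.drop i).take (n - i)).map (fun l => if pvIsOwnerLine l then new else l)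
          ++ (if seen || ((lines.drop i).take (n - i)).any pvIsOwnerLine then [] else [new])
          ++ "---" :: lines.drop (n + 1) := by
  intro k
  induction k with
  | zero =>
    intro i seen h1 h2 hk
    have hin : i = n := by omega
    subst hin
    rw [pvGo, dif_pos hn, if_pos hclose]
    simp
  | succ k ih =>
    intro i seen h1 h2 hk
    have hiln : i < n := by omega
    have hil : i < lines.length := by omega
    have hline : lines.getD i "" = lines[i] := List.getD_eq_getElem lines "" hil
    have hnc : ¬ PySem.Str.strip (lines.getD i "") = "---" := hmin i h1 hiln
    have hdrop : lines.drop i = lines[i] :: lines.drop (i + 1) :=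
      List.drop_eq_getElem_cons hil
    have hseg : (lines.drop i).take (n - i)
        = lines[i] :: (lines.drop (i + 1)).take (n - (i + 1)) := by
      rw [hdrop, (by omega : n - i = (n - (i + 1)) + 1), List.take_succ_cons]
    rw [pvGo]
    rw [dif_pos (by omega : i < min lines.length 200)]
    simp only [hline] at hnc ⊢
    rw [if_neg hnc]
    by_cases how : pvIsOwnerLine lines[i] = true
    · rw [if_pos how, ih (i + 1) true (by omega) (by omega) (by omega)]
      rw [hseg]
      simp [how]
    · rw [if_neg how, ih (i + 1) seen (by omega) (by omega) (by omega)]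
      rw [hseg]
      simp [how]

theorem pv_main (text owner : String)
    (hne : PySem.Str.splitlines text ≠ [])
    (hhead : PySem.Str.strip ((PySem.Str.splitlines text).headD "") = "---")
    (hany : ((List.range (min (PySem.Str.splitlines text).length 200)).any
      (fun i => decide (1 ≤ i) && (PySem.Str.strip ((PySem.Str.splitlines text).getD i "") == "---"))) = true) :
    patch_owner_in_fm text owner = patch_owner_in_fm_alt text owner := by
  obtain ⟨n, hfm, hn1, hnlim, hclose, hmin⟩ := pv_fmb_some text hne hhead hany
  simp only [patch_owner_in_fm, patch_owner_in_fm_alt, hfm]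
  rw [if_neg (show ¬ (PySem.Str.splitlines text = [] ∨
      ¬ PySem.Str.strip ((PySem.Str.splitlines text).headD "") = "---") from
      fun hor => hor.elim (fun h => hne h) (fun h => h hhead))]
  refine congrArg (fun z => z ++ (if PySem.Str.endswith text "\n" then "\n" else "")) ?_
  refine congrArg (PySem.Str.join "\n") ?_
  have e1 : ((0 : Int) + 1) = ((1 : Nat) : Int) := by norm_num
  rw [e1, PySem.List.slice_to_natCast, PySem.List.slice_natCast]
  have e2 : ((n : Int) + 1) = (((n + 1 : Nat)) : Int) := by push_cast; ring
  rw [e2, PySem.List.slice_from_natCast]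
  rw [pv_foldA]
  rw [pv_go_eq (PySem.Str.splitlines text) ("owner: " ++ owner) n hnlim hclose hmin
      (n - 1) 1 false le_rfl hn1 rfl]
  have htake1 : (PySem.Str.splitlines text).take 1 = [(PySem.Str.splitlines text).headD ""] := by
    rcases hL : PySem.Str.splitlines text with _ | ⟨h, t⟩
    · exact absurd hL hne
    · simp
  rw [htake1]
  rcases Bool.eq_false_or_eq_true
      ((((PySem.Str.splitlines text).drop 1).take (n - 1)).any pvIsOwnerLine) with hA | hA
  · rw [if_neg (show ¬ ((false || (((PySem.Str.splitlines text).drop 1).take (n - 1)).any pvIsOwnerLine) = false) by rw [Bool.false_or, hA]; simp),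
        if_pos (show (false || (((PySem.Str.splitlines text).drop 1).take (n - 1)).any pvIsOwnerLine) = true by rw [Bool.false_or]; exact hA)]
    simp
  · rw [if_pos (show (false || (((PySem.Str.splitlines text).drop 1).take (n - 1)).any pvIsOwnerLine) = false by rw [Bool.false_or]; exact hA),
        if_neg (show ¬ ((false || (((PySem.Str.splitlines text).drop 1).take (n - 1)).any pvIsOwnerLine) = true) by rw [Bool.false_or, hA]; simp)]
    simp

-- ===== VERDICT (by name: the statement is the Claim_ definition above) =====
theorem patch_owner_in_fm_spec : Claim_equal_patch_owner_in_fm := by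
  intro text owner _hdom hpre
  obtain ⟨h1, h2, h3⟩ := hpre
  exact pv_main text owner h1 h2 h3
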